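-- pv_equiv track=rewrite | github.com/code-heroes-pty-ltd/amazon-textract-textractor | src/signatures_parser.py | group_by_page_column
-- ===== SOURCE A (Python) =====
-- def group_by_page_column(signature_data):
--     result = {}
--     for data in signature_data:
--         key = (data['Page'], data['Column'])
--         if key in result:
--             grouped_items = result[key]
--         else:
--             grouped_items = []
--         grouped_items.append(data)
--         result[key] = grouped_items
--     return result
-- ===== SOURCE B (Python) =====
-- def group_by_page_column(signature_data):
--     # two-phase: collect distinct (Page, Column) keys in first-appearance order,
--     # then rescan the data per key to build each group
--     keys = []
--     for data in signature_data:
--         key = (data['Page'], data['Column'])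
--         if key not in keys:
--             keys.append(key)
--     return {key: [d for d in signature_data
--                   if (d['Page'], d['Column']) == key]
--             for key in keys}
-- ===== Notes on version B (the rewrite author's own statement) =====
-- stated objective: alternative
-- what changed: Replaces the single-pass dict-accumulation (lookup-append-reinsert per item) by a two-phase algorithm: one pass collecting the distinct (Page, Column) keys in first-appearance order, then one filtering rescan of the data per distinct key.
import Mathlib
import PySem

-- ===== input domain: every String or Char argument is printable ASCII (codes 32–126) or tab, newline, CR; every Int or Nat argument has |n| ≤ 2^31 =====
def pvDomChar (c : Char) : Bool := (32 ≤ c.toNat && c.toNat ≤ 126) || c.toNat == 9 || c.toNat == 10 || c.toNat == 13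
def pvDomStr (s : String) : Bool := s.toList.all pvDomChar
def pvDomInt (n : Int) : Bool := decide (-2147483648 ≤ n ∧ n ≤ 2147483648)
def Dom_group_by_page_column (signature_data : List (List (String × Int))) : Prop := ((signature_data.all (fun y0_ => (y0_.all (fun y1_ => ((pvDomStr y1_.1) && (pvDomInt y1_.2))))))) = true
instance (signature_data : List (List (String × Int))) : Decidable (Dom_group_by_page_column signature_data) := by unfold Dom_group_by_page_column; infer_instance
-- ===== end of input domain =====

-- B re-implements the grouping as two phases (distinct keys first, then a filtering
-- rescan per key) instead of A's single accumulating pass; return value only (A mutates nothing).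

-- shared key extraction: (data['Page'], data['Column']) — none where Python raises KeyError
def pvKey? (data : List (String × Int)) : Option (Int × Int) :=
  match (PySem.Dict.mk data).get? "Page", (PySem.Dict.mk data).get? "Column" with
  | some p, some c => some (p, c)
  | _, _ => none

-- ===== PORT A =====
-- loop body of A: dict lookup-or-[], append, reinsert
def pvStepA (r : PySem.Dict (Int × Int) (List (List (String × Int)))) (data : List (String × Int)) :
    PySem.Dict (Int × Int) (List (List (String × Int))) :=
  match pvKey? data with
  | some key => r.insert key (r.getD key [] ++ [data])
  | none => r

def group_by_page_column (signature_data : List (List (String × Int))) : List (Int × Int × List (List (String × Int))) :=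
  (signature_data.foldl pvStepA PySem.Dict.empty).items.map (fun p => (p.1.1, p.1.2, p.2))

-- ===== PORT B =====
-- B's first pass: distinct keys in order of first appearance
def pvStepKeys (ks : List (Int × Int)) (data : List (String × Int)) : List (Int × Int) :=
  match pvKey? data with
  | some k => if k ∈ ks then ks else ks ++ [k]
  | none => ks

def group_by_page_column_alt (signature_data : List (List (String × Int))) : List (Int × Int × List (List (String × Int))) :=
  (signature_data.foldl pvStepKeys []).map
    (fun k => (k.1, k.2, signature_data.filter (fun d => pvKey? d == some k)))

-- ===== PRECONDITION & SPEC =====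
-- Pre_ excludes exactly the inputs where some item lacks a 'Page' or 'Column' key, on which A raises KeyError
def Pre_group_by_page_column (signature_data : List (List (String × Int))) : Prop :=
  ∀ data ∈ signature_data, ((PySem.Dict.mk data).contains "Page" ∧ (PySem.Dict.mk data).contains "Column")
instance (signature_data : List (List (String × Int))) : Decidable (Pre_group_by_page_column signature_data) := by unfold Pre_group_by_page_column; infer_instance

def pvWitness_group_by_page_column : (List (List (String × Int))) :=
  [[("Page", 1), ("Column", 2)], [("Page", 1), ("Column", 2), ("score", 7)]]

def Spec_group_by_page_column (signature_data : List (List (String × Int))) (out : List (Int × Int × List (List (String × Int)))) : Prop := out = group_by_page_column_alt signature_data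
instance (signature_data : List (List (String × Int))) (out : List (Int × Int × List (List (String × Int)))) : Decidable (Spec_group_by_page_column signature_data out) := by unfold Spec_group_by_page_column; infer_instance

-- ===== CLAIM (what is proved, stated in full; the proofs are below) =====
def Claim_equal_group_by_page_column : Prop := ∀ (signature_data : List (List (String × Int))), Dom_group_by_page_column signature_data → Pre_group_by_page_column signature_data → Spec_group_by_page_column signature_data (group_by_page_column signature_data)

-- ===== LEMMAS AND PROOFS =====

-- distinct keys of a prefix
def pvKeysOf (l : List (List (String × Int))) : List (Int × Int) := l.foldl pvStepKeys []

-- canonical value of A's accumulator after processing `pre`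
def pvG (pre : List (List (String × Int))) : PySem.Dict (Int × Int) (List (List (String × Int))) :=
  PySem.Dict.mk ((pvKeysOf pre).map (fun k => (k, pre.filter (fun d => pvKey? d == some k))))

theorem pv_mem_foldl_stepKeys (l : List (List (String × Int))) (s : List (Int × Int)) (k : Int × Int) :
    k ∈ l.foldl pvStepKeys s ↔ k ∈ s ∨ ∃ d ∈ l, pvKey? d = some k := by
  induction l generalizing s with
  | nil => simp
  | cons d l ih =>
    simp only [List.foldl_cons, ih, pvStepKeys, List.mem_cons]
    cases h : pvKey? d with
    | none =>
      constructor
      · rintro (hs | ⟨e, he, hk⟩)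
        · exact Or.inl hs
        · exact Or.inr ⟨e, Or.inr he, hk⟩
      · rintro (hs | ⟨e, he | he, hk⟩)
        · exact Or.inl hs
        · subst he; simp [h] at hk
        · exact Or.inr ⟨e, he, hk⟩
    | some k0 =>
      by_cases hmem : k0 ∈ s
      · simp only [if_pos hmem]
        constructor
        · rintro (hs | ⟨e, he, hk⟩)
          · exact Or.inl hs
          · exact Or.inr ⟨e, Or.inr he, hk⟩
        · rintro (hs | ⟨e, he | he, hk⟩)
          · exact Or.inl hs
          · subst he; rw [h] at hk; cases hk; exact Or.inl hmem
          · exact Or.inr ⟨e, he, hk⟩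
      · simp only [if_neg hmem]
        constructor
        · rintro (hs | ⟨e, he, hk⟩)
          · rcases List.mem_append.1 hs with hs | hs
            · exact Or.inl hs
            · simp only [List.mem_singleton] at hs; subst hs
              exact Or.inr ⟨d, Or.inl rfl, h⟩
          · exact Or.inr ⟨e, Or.inr he, hk⟩
        · rintro (hs | ⟨e, he | he, hk⟩)
          · exact Or.inl (List.mem_append.2 (Or.inl hs))
          · subst he; rw [h] at hk; cases hk
            exact Or.inl (List.mem_append.2 (Or.inr (List.mem_singleton.2 rfl)))
          · exact Or.inr ⟨e, he, hk⟩

theorem pv_nodup_foldl_stepKeys (l : List (List (String × Int))) (s : List (Int × Int))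
    (hs : s.Nodup) : (l.foldl pvStepKeys s).Nodup := by
  induction l generalizing s with
  | nil => exact hs
  | cons d l ih =>
    simp only [List.foldl_cons, pvStepKeys]
    cases pvKey? d with
    | none => exact ih s hs
    | some k0 =>
      by_cases hmem : k0 ∈ s
      · simpa [if_pos hmem] using ih s hs
      · simp only [if_neg hmem]
        refine ih _ ?_
        simp only [List.nodup_append, List.nodup_singleton, true_and, hs]
        intro a ha c hc
        rw [List.mem_singleton] at hc
        subst hc
        exact fun e => hmem (e ▸ ha)

theorem pv_mem_keysOf (pre : List (List (String × Int))) (k : Int × Int) :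
    k ∈ pvKeysOf pre ↔ ∃ d ∈ pre, pvKey? d = some k := by
  simpa using pv_mem_foldl_stepKeys pre [] k

theorem pv_nodup_keysOf (pre : List (List (String × Int))) : (pvKeysOf pre).Nodup :=
  pv_nodup_foldl_stepKeys pre [] List.nodup_nil

theorem pv_keys_G (pre : List (List (String × Int))) : (pvG pre).keys = pvKeysOf pre := by
  simp only [pvG, PySem.Dict.keys]
  rw [List.map_map]
  exact (List.map_congr_left fun a _ => rfl).trans (List.map_id _)

theorem pv_getD_G (pre : List (List (String × Int))) (k : Int × Int) (hk : k ∈ pvKeysOf pre) :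
    (pvG pre).getD k [] = pre.filter (fun d => pvKey? d == some k) := by
  apply PySem.Dict.getD_of_mem_items
  · exact List.mem_map.2 ⟨k, hk, rfl⟩
  · rw [pv_keys_G]
    exact pv_nodup_keysOf pre

theorem pv_contains_G (pre : List (List (String × Int))) (k : Int × Int) :
    (pvG pre).contains k = decide (k ∈ pvKeysOf pre) := by
  rw [PySem.Dict.contains_eq_decide_mem_keys, pv_keys_G]

theorem pv_filter_key_eq_nil (pre : List (List (String × Int))) (k : Int × Int)
    (hk : k ∉ pvKeysOf pre) : pre.filter (fun d => pvKey? d == some k) = [] := by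
  rw [List.filter_eq_nil_iff]
  intro d hd hbeq
  exact hk ((pv_mem_keysOf pre k).2 ⟨d, hd, by simpa using hbeq⟩)

-- the one-step invariant: A's loop body takes the canonical state for `pre` to the one for `pre ++ [d]`
theorem pv_stepA_G (pre : List (List (String × Int))) (d : List (String × Int)) :
    pvStepA (pvG pre) d = pvG (pre ++ [d]) := by
  have hkeys : pvKeysOf (pre ++ [d]) = pvStepKeys (pvKeysOf pre) d := by
    simp [pvKeysOf, List.foldl_append]
  cases h : pvKey? d with
  | none =>
    simp only [pvStepA, h]
    apply PySem.Dict.ext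
    show _ = List.map _ _
    simp only [hkeys, pvStepKeys, h]
    apply (List.map_congr_left _).symm
    intro k _
    simp [List.filter_append, h]
  | some k0 =>
    simp only [pvStepA, h]
    by_cases hmem : k0 ∈ pvKeysOf pre
    · apply PySem.Dict.ext
      rw [PySem.Dict.items_insert_of_contains _ _ (by rw [pv_contains_G]; simpa using hmem)]
      rw [pv_getD_G pre k0 hmem]
      show _ = List.map _ _
      simp only [hkeys, pvStepKeys, h, if_pos hmem]
      show List.map _ (List.map _ _) = _
      rw [List.map_map]
      apply List.map_congr_left
      intro k hk
      by_cases hkk : k = k0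
      · subst hkk
        simp [List.filter_append, h]
      · simp [List.filter_append, h, hkk, Ne.symm hkk]
    · apply PySem.Dict.ext
      rw [PySem.Dict.items_insert_of_not_contains _ _ (by rw [pv_contains_G]; simpa using hmem)]
      rw [PySem.Dict.getD_of_not_contains _ _ (by rw [pv_contains_G]; simpa using hmem)]
      show _ = List.map _ _
      simp only [hkeys, pvStepKeys, h, if_neg hmem, List.map_append]
      show List.map _ _ ++ _ = _
      congr 1
      · apply List.map_congr_left
        intro k hk
        have hkk : k ≠ k0 := fun e => hmem (e ▸ hk)
        simp [List.filter_append, h, Ne.symm hkk]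
      · simp [List.filter_append, h, pv_filter_key_eq_nil pre k0 hmem]
theorem pv_foldA_eq_G (l pre : List (List (String × Int))) :
    l.foldl pvStepA (pvG pre) = pvG (pre ++ l) := by
  induction l generalizing pre with
  | nil => simp
  | cons d l ih =>
    rw [List.foldl_cons, pv_stepA_G, ih, ← List.append_cons]

theorem pv_foldA_eq_G_nil (l : List (List (String × Int))) :
    l.foldl pvStepA PySem.Dict.empty = pvG l := by
  have h := pv_foldA_eq_G l []
  simpa using h

-- ===== VERDICT (by name: the statement is the Claim_ definition above) =====
theorem group_by_page_column_spec : Claim_equal_group_by_page_column := by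
  intro sd _ _
  unfold Spec_group_by_page_column
  rw [group_by_page_column, pv_foldA_eq_G_nil]
  simp [pvG, group_by_page_column_alt, pvKeysOf, List.map_map, Function.comp]
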